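-- pv_equiv track=rewrite | github.com/zhaolijian/suanfa | huawei/30.py | reverse_char
-- ===== SOURCE A (Python) =====
-- def reverse_char(number):
--     temp = ''
--     i = 0
--     while i < 4:
--         temp += '1' if number & (1 << i) else '0'
--         i += 1
--     val = 0
--     for i in range(3, -1, -1):
--         if temp[i] == '1':
--             val += pow(2, 3 - i)
--     if val < 10:
--         return str(val)
--     else:
--         return chr(val + 55)
-- ===== SOURCE B (Python) =====
-- def reverse_char(number):
--     v = number & 0xF
--     r = int(format(v, '04b')[::-1], 2)
--     return '0123456789ABCDEF'[r]
-- ===== Notes on version B (the rewrite author's own statement) =====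
-- stated objective: simpler
-- what changed: Replaces A's bit-probing while-loop, weighted re-scan loop and decimal-vs-letter branch by masking the low nibble, reversing its four-bit binary string and indexing a hex-digit table.
import Mathlib
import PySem

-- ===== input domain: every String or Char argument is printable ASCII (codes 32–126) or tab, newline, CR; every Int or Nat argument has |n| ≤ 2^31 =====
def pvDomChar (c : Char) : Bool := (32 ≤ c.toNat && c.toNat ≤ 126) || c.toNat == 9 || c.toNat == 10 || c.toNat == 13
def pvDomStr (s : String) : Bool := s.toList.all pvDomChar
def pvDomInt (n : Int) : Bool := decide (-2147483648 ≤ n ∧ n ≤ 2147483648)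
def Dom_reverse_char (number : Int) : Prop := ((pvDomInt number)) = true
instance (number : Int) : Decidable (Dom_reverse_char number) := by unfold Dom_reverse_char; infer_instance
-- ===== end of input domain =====

-- B replaces A's two loops by masking the low nibble, reversing its 4-bit binary string and
-- indexing a hex-digit table (objective: simpler).

-- ===== PORT A =====
def reverse_char (number : Int) : String :=
  let temp : List Char := (List.range 4).foldl
    (fun (t : List Char) (i : Nat) => t ++ [if PySem.Int.band number ((1:Int) <<< i) ≠ 0 then '1' else '0']) []
  let val : Int := (PySem.List.pyRange 3 (-1) (-1)).foldl
    (fun v i => if (PySem.List.pyGet? temp i).getD ' ' = '1' then v + 2 ^ (3 - i).toNat else v) 0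
  if val < 10 then PySem.Int.toStr val else String.ofList [Char.ofNat (val + 55).toNat]

-- ===== PORT B =====
def pvBitChar (b : Int) : Char := if b = 1 then '1' else '0'

def reverse_char_alt (number : Int) : String :=
  let v : Int := PySem.Int.band number 15
  -- format(v, '04b'): hand port, exact for 0 ≤ v < 16 (always holds for v = number & 15)
  let s : List Char := [pvBitChar (PySem.Int.mod (PySem.Int.floordiv v 8) 2),
                        pvBitChar (PySem.Int.mod (PySem.Int.floordiv v 4) 2),
                        pvBitChar (PySem.Int.mod (PySem.Int.floordiv v 2) 2),
                        pvBitChar (PySem.Int.mod v 2)]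
  -- int(_, 2) on a '0'/'1' string: hand port, exact for such strings
  let r : Int := s.reverse.foldl (fun acc c => 2 * acc + (if c = '1' then 1 else 0)) 0
  String.ofList [(PySem.Str.pyGet? "0123456789ABCDEF" r).getD '0']

-- ===== PRECONDITION & SPEC =====
def Spec_reverse_char (number : Int) (out : String) : Prop := out = reverse_char_alt number
instance (number : Int) (out : String) : Decidable (Spec_reverse_char number out) := by unfold Spec_reverse_char; infer_instance

-- ===== CLAIM (what is proved, stated in full; the proofs are below) =====
def Claim_equal_reverse_char : Prop := ∀ (number : Int), Dom_reverse_char number → Spec_reverse_char number (reverse_char number)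

-- ===== LEMMAS AND PROOFS =====

-- a & b with b < 2^4 only reads the low 4 bits of a (Nat level)
theorem pv_land_mod16 (m b : Nat) (hb : b < 16) : m &&& b = m % 16 &&& b := by
  apply Nat.eq_of_testBit_eq; intro i
  simp only [Nat.testBit_and]
  by_cases h : i < 4
  · have : m % 16 = m % 2^4 := by norm_num
    rw [this, Nat.testBit_mod_two_pow]; simp [h]
  · have hbi : b.testBit i = false := by
      apply Nat.testBit_eq_false_of_lt
      calc b < 16 := hb
        _ = 2^4 := by norm_num
        _ ≤ 2^i := Nat.pow_le_pow_right (by norm_num) (by omega)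
    simp [hbi]

theorem pv_sub_and (B x : Nat) (hB : B < 16) (hx : x < 16) :
    B - (B &&& x) = (15 - x) &&& B := by
  interval_cases B <;> interval_cases x <;> rfl

-- Python's a & b with 0 ≤ b < 16 depends only on a's residue mod 16
theorem pv_band_emod16 (n b : Int) (hb0 : 0 ≤ b) (hb : b < 16) :
    PySem.Int.band n b = PySem.Int.band (n % 16) b := by
  have hr0 : 0 ≤ n % 16 := Int.emod_nonneg n (by norm_num)
  have hr16 : n % 16 < 16 := Int.emod_lt_of_pos n (by norm_num)
  have hB : b.toNat < 16 := by omega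
  rw [PySem.Int.band_of_nonneg hr0 hb0]
  by_cases h : 0 ≤ n
  · rw [PySem.Int.band_of_nonneg h hb0]
    have hm : (n % 16).toNat = n.toNat % 16 := by omega
    rw [hm, pv_land_mod16 n.toNat b.toNat hB]
  · have hdef : PySem.Int.band n b = ((b.toNat - (b.toNat &&& (-n - 1).toNat) : Nat) : Int) := by
      simp only [PySem.Int.band, if_neg h, if_pos hb0]
    rw [hdef]
    have hm : (n % 16).toNat = 15 - (-n - 1).toNat % 16 := by omega
    rw [hm]
    have h1 : b.toNat &&& (-n - 1).toNat = (-n - 1).toNat % 16 &&& b.toNat := by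
      rw [Nat.and_comm]; exact pv_land_mod16 _ _ hB
    rw [h1, Nat.and_comm ((-n - 1).toNat % 16) b.toNat,
        pv_sub_and b.toNat ((-n - 1).toNat % 16) hB (Nat.mod_lt _ (by norm_num))]

theorem pv_A_red (n : Int) : reverse_char n = reverse_char (n % 16) := by
  simp only [reverse_char, show List.range 4 = [0, 1, 2, 3] from rfl,
             List.foldl_cons, List.foldl_nil]
  rw [pv_band_emod16 n ((1:Int) <<< (0:Nat)) (by decide) (by decide),
      pv_band_emod16 n ((1:Int) <<< (1:Nat)) (by decide) (by decide),
      pv_band_emod16 n ((1:Int) <<< (2:Nat)) (by decide) (by decide),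
      pv_band_emod16 n ((1:Int) <<< (3:Nat)) (by decide) (by decide)]

theorem pv_B_red (n : Int) : reverse_char_alt n = reverse_char_alt (n % 16) := by
  simp only [reverse_char_alt]
  rw [pv_band_emod16 n 15 (by norm_num) (by norm_num)]

theorem pv_small (r : Int) (h0 : 0 ≤ r) (h1 : r < 16) :
    reverse_char r = reverse_char_alt r := by
  interval_cases r <;> decide

-- ===== VERDICT (by name: the statement is the Claim_ definition above) =====
theorem reverse_char_spec : Claim_equal_reverse_char := by
  intro number _
  unfold Spec_reverse_char
  calc reverse_char number = reverse_char (number % 16) := pv_A_red number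
    _ = reverse_char_alt (number % 16) :=
        pv_small _ (Int.emod_nonneg number (by norm_num)) (Int.emod_lt_of_pos number (by norm_num))
    _ = reverse_char_alt number := (pv_B_red number).symm
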